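-- pv_equiv track=rewrite | github.com/tamvi-journal/state-agent-runtime-test | src/workers/screening_worker.py | _group_rows_by_ticker
-- ===== SOURCE A (Python) =====
-- def _group_rows_by_ticker(rows: list[dict[str, str]]) -> dict[str, list[dict[str, str]]]:
--     grouped: dict[str, list[dict[str, str]]] = {}
--     for row in rows:
--         ticker = str(row.get("ticker", "")).upper()
--         if not ticker:
--             continue
--         grouped.setdefault(ticker, []).append(row)
--     return grouped
-- ===== SOURCE B (Python) =====
-- def _group_rows_by_ticker(rows: list[dict[str, str]]) -> dict[str, list[dict[str, str]]]:
--     def key(row):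
--         return str(row.get("ticker", "")).upper()
--     keys = list(dict.fromkeys(key(row) for row in rows if key(row)))
--     return {k: [row for row in rows if key(row) == k] for k in keys}
-- ===== Notes on version B (the rewrite author's own statement) =====
-- stated objective: alternative
-- what changed: Replaces the single-pass setdefault/append dict accumulation with a two-pass scheme: first collect the distinct non-empty uppercased keys in first-seen order via dict.fromkeys, then build each group with one filter comprehension per key.
import Mathlib
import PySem

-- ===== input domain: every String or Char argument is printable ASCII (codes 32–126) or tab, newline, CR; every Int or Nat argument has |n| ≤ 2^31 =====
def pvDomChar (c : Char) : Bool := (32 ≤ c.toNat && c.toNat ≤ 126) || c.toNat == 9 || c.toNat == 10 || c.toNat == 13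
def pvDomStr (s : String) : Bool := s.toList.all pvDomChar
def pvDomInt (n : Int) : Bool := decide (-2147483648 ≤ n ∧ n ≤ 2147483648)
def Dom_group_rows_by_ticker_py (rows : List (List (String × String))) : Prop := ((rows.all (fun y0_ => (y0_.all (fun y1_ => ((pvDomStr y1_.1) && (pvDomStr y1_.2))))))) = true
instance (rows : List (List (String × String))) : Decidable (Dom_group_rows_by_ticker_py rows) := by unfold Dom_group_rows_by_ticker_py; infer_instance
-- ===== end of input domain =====

-- B replaces A's single-pass setdefault/append accumulation with a two-pass scheme (dedup the
-- non-empty keys in first-seen order, then one filter per key); objective: alternative structure.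

-- ===== PORT A =====
-- ticker = str(row.get("ticker", "")).upper()   (shared: both Pythons compute this same expression)
def rowKey (row : List (String × String)) : String :=
  PySem.Str.upper ((PySem.Dict.mk row).getD "ticker" "")

-- grouped.setdefault(t, []).append(row)  ==  grouped[t] = grouped.get(t, []) + [row]  = Dict.modify
def group_rows_by_ticker_py (rows : List (List (String × String))) : List (String × List (List (String × String))) :=
  (rows.foldl (fun d row =>
      let t := rowKey row
      if t = "" then d
      else d.modify t [] (· ++ [row]))
    PySem.Dict.empty).items

-- ===== PORT B =====
def group_rows_by_ticker_py_alt (rows : List (List (String × String))) : List (String × List (List (String × String))) :=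
  let keys := PySem.List.dedup ((rows.filter (fun r => decide (rowKey r ≠ ""))).map rowKey)
  keys.map (fun k => (k, rows.filter (fun r => decide (rowKey r = k))))

-- ===== PRECONDITION & SPEC =====
def Spec_group_rows_by_ticker_py (rows : List (List (String × String))) (out : List (String × List (List (String × String)))) : Prop := out = group_rows_by_ticker_py_alt rows
instance (rows : List (List (String × String))) (out : List (String × List (List (String × String)))) : Decidable (Spec_group_rows_by_ticker_py rows out) := by unfold Spec_group_rows_by_ticker_py; infer_instance

-- ===== CLAIM (what is proved, stated in full; the proofs are below) =====
def Claim_equal_group_rows_by_ticker_py : Prop := ∀ (rows : List (List (String × String))), Dom_group_rows_by_ticker_py rows → Spec_group_rows_by_ticker_py rows (group_rows_by_ticker_py rows)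

-- ===== LEMMAS AND PROOFS =====

-- A's loop skips rows with an empty key: folding over rows equals folding over the filtered list.
theorem foldA_eq_foldl_filter (rows : List (List (String × String)))
    (d : PySem.Dict String (List (List (String × String)))) :
    rows.foldl (fun d row =>
        let t := rowKey row
        if t = "" then d else d.modify t [] (· ++ [row])) d
      = (rows.filter (fun r => decide (rowKey r ≠ ""))).foldl
          (fun d r => d.modify (rowKey r) [] (· ++ [r])) d := by
  induction rows generalizing d with
  | nil => rfl
  | cons r rs ih =>
    by_cases h : rowKey r = "" <;> simp [h, ih]

-- the fold over the filtered list, described: keys and per-key values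
theorem foldA_items (l : List (List (String × String))) :
    (l.foldl (fun d r => d.modify (rowKey r) [] (· ++ [r])) PySem.Dict.empty).items
      = (PySem.Set.ofList (l.map rowKey)).map
          (fun k => (k, l.filter (fun r => decide (rowKey r = k)))) := by
  have hfold : l.foldl (fun d r => d.modify (rowKey r) [] (· ++ [r])) PySem.Dict.empty
      = (l.map (fun r => (rowKey r, r))).foldl
          (fun d p => d.modify p.1 [] (· ++ [p.2])) PySem.Dict.empty := by
    rw [List.foldl_map]
  have hnd : (l.foldl (fun d r => d.modify (rowKey r) [] (· ++ [r])) PySem.Dict.empty).keys.Nodup := by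
    exact PySem.Dict.nodup_keys_foldl_modify_key l rowKey [] (fun d r => (· ++ [r]))
      PySem.Dict.empty (by simp)
  have hkeys : (l.foldl (fun d r => d.modify (rowKey r) [] (· ++ [r])) PySem.Dict.empty).keys
      = PySem.Set.ofList (l.map rowKey) := by
    rw [PySem.Dict.keys_foldl_modify_key]
    simp [PySem.Set.update, PySem.Set.ofList_eq_foldl]
  rw [PySem.Dict.items_eq_map_keys _ hnd [], hkeys]
  apply List.map_congr_left
  intro k hk
  have hget : (l.foldl (fun d r => d.modify (rowKey r) [] (· ++ [r])) PySem.Dict.empty).getD k []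
      = l.filter (fun r => decide (rowKey r = k)) := by
    rw [hfold, PySem.Dict.getD_foldl_modify_append]
    simp [List.filter_map, Function.comp_def]
    apply List.filter_congr
    intro r _
    by_cases h : rowKey r = k <;> simp [h]
  rw [hget]

-- ===== VERDICT (by name: the statement is the Claim_ definition above) =====
theorem group_rows_by_ticker_py_spec : Claim_equal_group_rows_by_ticker_py := by
  intro rows _
  unfold Spec_group_rows_by_ticker_py group_rows_by_ticker_py group_rows_by_ticker_py_alt
  rw [foldA_eq_foldl_filter]
  rw [foldA_items]
  rw [PySem.List.dedup_eq_ofList]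
  apply List.map_congr_left
  intro k hk
  have hkne : k ≠ "" := by
    rcases (PySem.Set.mem_ofList _ _).1 hk with hmem
    rcases List.mem_map.1 hmem with ⟨r, hr, rfl⟩
    simpa using (List.of_mem_filter hr)
  simp only [List.filter_filter]
  congr 1
  apply List.filter_congr
  intro r _
  by_cases h : rowKey r = k <;> simp [h, hkne]
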